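-- pv_equiv track=rewrite | github.com/kevinraphael95/discord_bot_kisuke_urahara | abandonné/lab.py | render_maze
-- ===== SOURCE A (Python) =====
-- def render_maze(maze, player_pos, vision=1):
--     rendered = ""
--     px, py = player_pos
--     for y, row in enumerate(maze):
--         for x, cell in enumerate(row):
--             if abs(x - px) <= vision and abs(y - py) <= vision:
--                 rendered += cell
--             else:
--                 rendered += '⬛'
--         rendered += '\n'
--     return rendered
-- ===== SOURCE B (Python) =====
-- def render_maze(maze, player_pos, vision=1):
--     px, py = player_pos
--     lines = []
--     for y, row in enumerate(maze):
--         n = len(row)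
--         if abs(y - py) > vision:
--             line = '⬛' * n
--         else:
--             lo = min(max(px - vision, 0), n)
--             hi = min(max(px + vision + 1, lo), n)
--             line = '⬛' * lo + ''.join(row[lo:hi]) + '⬛' * (n - hi)
--         lines.append(line)
--     return ''.join(line + '\n' for line in lines)
-- ===== Notes on version B (the rewrite author's own statement) =====
-- stated objective: alternative
-- what changed: Replaces A's per-cell abs-distance test inside a nested character-append loop by per-row window arithmetic: rows outside the vertical vision range become a single black run, in-range rows are built as left black run ++ visible slice ++ right black run.
import Mathlib
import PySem

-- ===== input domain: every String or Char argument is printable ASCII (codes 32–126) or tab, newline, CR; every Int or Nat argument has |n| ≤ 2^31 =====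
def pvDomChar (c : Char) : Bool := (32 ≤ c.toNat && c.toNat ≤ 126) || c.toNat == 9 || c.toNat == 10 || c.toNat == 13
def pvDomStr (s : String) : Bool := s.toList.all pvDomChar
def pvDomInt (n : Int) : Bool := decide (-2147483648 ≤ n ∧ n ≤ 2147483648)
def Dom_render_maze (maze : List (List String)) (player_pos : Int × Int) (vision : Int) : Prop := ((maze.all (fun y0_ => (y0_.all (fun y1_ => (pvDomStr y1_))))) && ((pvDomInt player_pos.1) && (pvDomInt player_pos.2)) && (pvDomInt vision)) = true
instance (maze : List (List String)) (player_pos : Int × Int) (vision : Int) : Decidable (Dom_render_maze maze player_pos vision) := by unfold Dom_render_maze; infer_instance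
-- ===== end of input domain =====

-- B replaces A's per-cell abs test by per-row window slicing: rows out of vertical
-- range become one black run, in-range rows are black-run ++ visible slice ++ black-run
-- (objective: alternative decomposition, same cost).

-- ===== PORT A =====
def render_maze (maze : List (List String)) (player_pos : Int × Int) (vision : Int) : String :=
  let px := player_pos.1
  let py := player_pos.2
  (PySem.List.enumerate maze).foldl (fun rendered yrow =>
    ((PySem.List.enumerate yrow.2).foldl (fun r xc =>
        if |xc.1 - px| ≤ vision ∧ |yrow.1 - py| ≤ vision then r ++ xc.2 else r ++ "⬛")
      rendered) ++ "\n") ""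

-- ===== PORT B =====
-- '⬛' * k : repetition of a single character, exact
def blackRun (k : Nat) : String := String.ofList (List.replicate k '⬛')

def render_maze_alt (maze : List (List String)) (player_pos : Int × Int) (vision : Int) : String :=
  let px := player_pos.1
  let py := player_pos.2
  let lines := (PySem.List.enumerate maze).foldl (fun lines yrow =>
    let row := yrow.2
    let n : Int := row.length
    let line :=
      if vision < |yrow.1 - py| then blackRun n.toNat
      else
        let lo := min (max (px - vision) 0) n
        let hi := min (max (px + vision + 1) lo) n
        blackRun lo.toNat ++
          PySem.Str.join "" (PySem.List.slice row (some lo) (some hi)) ++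
          blackRun (n - hi).toNat
    lines ++ [line]) []
  PySem.Str.join "" (lines.map (fun line => line ++ "\n"))

-- ===== PRECONDITION & SPEC =====
def Spec_render_maze (maze : List (List String)) (player_pos : Int × Int) (vision : Int) (out : String) : Prop := out = render_maze_alt maze player_pos vision
instance (maze : List (List String)) (player_pos : Int × Int) (vision : Int) (out : String) : Decidable (Spec_render_maze maze player_pos vision out) := by unfold Spec_render_maze; infer_instance

-- ===== CLAIM (what is proved, stated in full; the proofs are below) =====
def Claim_equal_render_maze : Prop := ∀ (maze : List (List String)) (player_pos : Int × Int) (vision : Int), Dom_render_maze maze player_pos vision → Spec_render_maze maze player_pos vision (render_maze maze player_pos vision)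

-- ===== LEMMAS AND PROOFS =====

-- the characters one cell of row y contributes to the output
def pvCell (px py v y : Int) (p : Int × String) : List Char :=
  if |p.1 - px| ≤ v ∧ |y - py| ≤ v then p.2.toList else ['⬛']

lemma pv_A_inner (px py v y : Int) (l : List (Int × String)) (acc : String) :
    (l.foldl (fun r xc =>
        if |xc.1 - px| ≤ v ∧ |y - py| ≤ v then r ++ xc.2 else r ++ "⬛") acc).toList
      = acc.toList ++ l.flatMap (pvCell px py v y) := by
  induction l generalizing acc with
  | nil => simp
  | cons p t ih =>
    simp only [List.foldl_cons, List.flatMap_cons, ih]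
    by_cases h : |p.1 - px| ≤ v ∧ |y - py| ≤ v <;>
      simp [pvCell, h, List.append_assoc]

lemma pv_A_outer (px py v : Int) (l : List (Int × List String)) (acc : String) :
    (l.foldl (fun rendered yrow =>
        ((PySem.List.enumerate yrow.2).foldl (fun r xc =>
            if |xc.1 - px| ≤ v ∧ |yrow.1 - py| ≤ v then r ++ xc.2 else r ++ "⬛")
          rendered) ++ "\n") acc).toList
      = acc.toList ++ l.flatMap (fun yrow =>
          (PySem.List.enumerate yrow.2).flatMap (pvCell px py v yrow.1) ++ ['\n']) := by
  induction l generalizing acc with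
  | nil => simp
  | cons p t ih =>
    simp only [List.foldl_cons, List.flatMap_cons, ih, String.toList_append,
      pv_A_inner]
    simp [List.append_assoc]

lemma pv_join_flatten (ps : List (List Char)) : PySem.Chars.join [] ps = ps.flatten := by
  induction ps with
  | nil => simp [PySem.Chars.join_nil]
  | cons p t ih =>
    cases t with
    | nil => simp [PySem.Chars.join_singleton]
    | cons q r => rw [PySem.Chars.join_cons_cons]; simp_all

lemma pv_invis (px py v y : Int) (l : List (Int × String))
    (h : ∀ p ∈ l, ¬ (|p.1 - px| ≤ v ∧ |y - py| ≤ v)) :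
    l.flatMap (pvCell px py v y) = List.replicate l.length '⬛' := by
  induction l with
  | nil => simp
  | cons p t ih =>
    simp only [List.flatMap_cons, List.length_cons, List.replicate_succ]
    rw [ih (fun q hq => h q (List.mem_cons_of_mem _ hq))]
    simp [pvCell, h p (List.mem_cons_self ..)]

lemma pv_vis (px py v y : Int) (l : List (Int × String))
    (h : ∀ p ∈ l, |p.1 - px| ≤ v ∧ |y - py| ≤ v) :
    l.flatMap (pvCell px py v y) = (l.map (fun p => p.2.toList)).flatten := by
  induction l with
  | nil => simp
  | cons p t ih =>
    simp only [List.flatMap_cons, List.map_cons, List.flatten_cons]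
    rw [ih (fun q hq => h q (List.mem_cons_of_mem _ hq))]
    simp [pvCell, h p (List.mem_cons_self ..)]

-- the per-row equality: B's line (as characters) is exactly A's per-cell rendering
lemma pv_row (px py v y : Int) (row : List String) :
    (if v < |y - py| then blackRun (row.length : Int).toNat
     else
       blackRun (min (max (px - v) 0) (row.length : Int)).toNat ++
         PySem.Str.join "" (PySem.List.slice row
           (some (min (max (px - v) 0) (row.length : Int)))
           (some (min (max (px + v + 1) (min (max (px - v) 0) (row.length : Int)))
             (row.length : Int)))) ++
         blackRun ((row.length : Int) -
           min (max (px + v + 1) (min (max (px - v) 0) (row.length : Int)))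
             (row.length : Int)).toNat).toList
      = (PySem.List.enumerate row).flatMap (pvCell px py v y) := by
  set n : Int := (row.length : Int) with hn
  by_cases hy : v < |y - py|
  · rw [if_pos hy, pv_invis px py v y _ (fun p _ hc => absurd hc.2 (not_le.mpr hy))]
    simp [blackRun, PySem.List.length_enumerate, hn]
  · rw [if_neg hy]
    rw [not_lt] at hy
    have hv : 0 ≤ v := le_trans (abs_nonneg _) hy
    set lo : Int := min (max (px - v) 0) n with hlo
    set hi : Int := min (max (px + v + 1) lo) n with hhi
    have hn0 : 0 ≤ n := by positivity
    have h0lo : 0 ≤ lo := by omega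
    have hlohi : lo ≤ hi := by omega
    have hhin : hi ≤ n := by omega
    set a : Nat := lo.toNat with ha
    set b : Nat := hi.toNat with hb
    have hai : (a : Int) = lo := Int.toNat_of_nonneg h0lo
    have hbi : (b : Int) = hi := Int.toNat_of_nonneg (le_trans h0lo hlohi)
    have han : a ≤ row.length := by omega
    have hbn : b ≤ row.length := by omega
    have hab : a ≤ b := by omega
    -- split the row at the window bounds
    have hsplit : row = row.take a ++ ((row.drop a).take (b - a) ++ (row.drop a).drop (b - a)) := by
      simp
    have hdrop : (row.drop a).drop (b - a) = row.drop b := by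
      rw [List.drop_drop]; congr 1; omega
    rw [PySem.List.slice_toNat row h0lo (le_trans h0lo hlohi), ← ha, ← hb]
    conv_rhs => rw [hsplit, hdrop]
    rw [PySem.List.enumerate_append, PySem.List.enumerate_append, List.flatMap_append,
      List.flatMap_append]
    have hlen1 : (row.take a).length = a := by simp [han]
    have hlen2 : ((row.drop a).take (b - a)).length = b - a := by
      simp; omega
    have hlen3 : (row.drop b).length = row.length - b := by simp
    -- left black run
    rw [pv_invis px py v y _ (fun p hp => by
      rcases (PySem.List.mem_enumerate_iff _ _ _).mp hp with ⟨k, hk, rfl⟩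
      rw [hlen1] at hk
      rintro ⟨h1, -⟩
      rw [abs_le] at h1
      omega)]
    -- middle: all visible
    rw [pv_vis px py v y _ (fun p hp => by
      rcases (PySem.List.mem_enumerate_iff _ _ _).mp hp with ⟨k, hk, rfl⟩
      rw [hlen2] at hk
      refine ⟨?_, hy⟩
      rw [abs_le]
      omega)]
    -- right black run
    rw [pv_invis px py v y _ (fun p hp => by
      rcases (PySem.List.mem_enumerate_iff _ _ _).mp hp with ⟨k, hk, rfl⟩
      rw [hlen3] at hk
      rintro ⟨h1, -⟩
      rw [abs_le] at h1
      simp only [hlen1, hlen2] at h1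
      omega)]
    simp only [String.toList_append, PySem.List.length_enumerate, hlen1, hlen2,
      List.length_drop, blackRun, String.toList_ofList]
    have h0 : "".toList = ([] : List Char) := rfl
    rw [PySem.Str.toList_join, h0, pv_join_flatten, List.append_assoc]
    congr 1
    congr 1
    · rw [show (fun p : Int × String => p.2.toList) = (String.toList ∘ Prod.snd) from rfl,
        ← List.map_map, PySem.List.map_snd_enumerate]
    · congr 1
      omega

-- ===== VERDICT (by name: the statement is the Claim_ definition above) =====
theorem render_maze_spec : Claim_equal_render_maze := by
  intro maze player_pos vision _
  unfold Spec_render_maze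
  apply String.toList_inj.mp
  unfold render_maze render_maze_alt
  simp only []
  rw [pv_A_outer, PySem.List.foldl_append_singleton_eq_map, PySem.Str.toList_join]
  have h0 : "".toList = ([] : List Char) := rfl
  rw [h0, pv_join_flatten]
  simp only [List.nil_append, List.map_map]
  rw [List.flatMap_def]
  congr 1
  apply List.map_congr_left
  intro yrow _
  simp only [Function.comp_apply, String.toList_append]
  rw [pv_row player_pos.1 player_pos.2 vision yrow.1 yrow.2]
  rfl
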